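-- pv_equiv track=rewrite | github.com/coreyhsu1013/agent-mesh | src/orchestrator/model_ranking.py | get_model_rank
-- ===== SOURCE A (Python) =====
-- DEFAULT_RANKS: list[str] = [
--     "xai/grok-4-fast-non-reasoning",       # rank 0
--     "xai/grok-4-1-fast-non-reasoning",     # rank 1
--     "xai/grok-code-fast-1",                # rank 2
--     "xai/grok-4-fast-reasoning",           # rank 3
--     "xai/grok-4-1-fast-reasoning",         # rank 4
--     "deepseek/deepseek-reasoner",          # rank 5
--     "claude-sonnet-4-6",                   # rank 6
--     "claude-opus-4-6",                     # rank 7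
-- ]
--
-- def get_model_rank(model: str, ranks: list[str] | None = None) -> int:
--     """Return the rank (0-based) for a given model string.
--     Higher rank = stronger model. Unknown models → 0."""
--     ranks = ranks or DEFAULT_RANKS
--     try:
--         return ranks.index(model)
--     except ValueError:
--         # Partial match fallback
--         for idx, ranked_model in enumerate(ranks):
--             if model in ranked_model or ranked_model in model:
--                 return idx
--         return 0
-- ===== SOURCE B (Python) =====
-- DEFAULT_RANKS: list[str] = [
--     "xai/grok-4-fast-non-reasoning",       # rank 0
--     "xai/grok-4-1-fast-non-reasoning",     # rank 1
--     "xai/grok-code-fast-1",                # rank 2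
--     "xai/grok-4-fast-reasoning",           # rank 3
--     "xai/grok-4-1-fast-reasoning",         # rank 4
--     "deepseek/deepseek-reasoner",          # rank 5
--     "claude-sonnet-4-6",                   # rank 6
--     "claude-opus-4-6",                     # rank 7
-- ]
--
-- def get_model_rank(model: str, ranks: list[str] | None = None) -> int:
--     """Single pass: return first exact match; otherwise remember the first
--     partial match and return it (or 0) after the scan."""
--     ranks = ranks or DEFAULT_RANKS
--     partial = None
--     for idx, ranked in enumerate(ranks):
--         if ranked == model:
--             return idx
--         if partial is None and (model in ranked or ranked in model):
--             partial = idx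
--     return partial if partial is not None else 0
-- ===== Notes on version B (the rewrite author's own statement) =====
-- stated objective: simpler
-- what changed: Replaced the .index call plus try/except plus a second fallback scan with one enumerate pass that returns on an exact match and remembers the first partial-match index for after the loop.
import Mathlib
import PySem

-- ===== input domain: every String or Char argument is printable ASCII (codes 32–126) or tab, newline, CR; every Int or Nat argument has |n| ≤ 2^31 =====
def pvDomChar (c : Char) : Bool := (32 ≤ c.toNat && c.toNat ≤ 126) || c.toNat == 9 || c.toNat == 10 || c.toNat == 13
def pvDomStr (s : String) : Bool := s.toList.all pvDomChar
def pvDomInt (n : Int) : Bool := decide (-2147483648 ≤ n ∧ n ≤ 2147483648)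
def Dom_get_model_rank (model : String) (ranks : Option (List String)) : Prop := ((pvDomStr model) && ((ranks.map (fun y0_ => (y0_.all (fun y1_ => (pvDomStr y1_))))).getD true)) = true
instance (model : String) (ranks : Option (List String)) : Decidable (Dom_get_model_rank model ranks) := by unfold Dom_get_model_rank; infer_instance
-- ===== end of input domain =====

-- B replaces A's .index + try/except + separate fallback scan with one pass that
-- remembers the first partial-match index (objective: simpler).


-- the module constant DEFAULT_RANKS (shared data, used by both programs)
def pvDefaultRanks : List String :=
  [ "xai/grok-4-fast-non-reasoning"
  , "xai/grok-4-1-fast-non-reasoning"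
  , "xai/grok-code-fast-1"
  , "xai/grok-4-fast-reasoning"
  , "xai/grok-4-1-fast-reasoning"
  , "deepseek/deepseek-reasoner"
  , "claude-sonnet-4-6"
  , "claude-opus-4-6" ]

-- 'ranks = ranks or DEFAULT_RANKS' (None or [] are falsy)
def pvEffRanks (ranks : Option (List String)) : List String :=
  match ranks with
  | none => pvDefaultRanks
  | some [] => pvDefaultRanks
  | some l => l

-- ===== PORT A =====
-- A's fallback loop: 'for idx, ranked_model in enumerate(ranks): if model in ranked_model or ranked_model in model: return idx' else 0
def pvFallbackA (model : String) : List String → Int → Int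
  | [], _ => 0
  | r :: rest, idx =>
    if PySem.Str.isIn model r || PySem.Str.isIn r model then idx
    else pvFallbackA model rest (idx + 1)

def get_model_rank (model : String) (ranks : Option (List String)) : Int :=
  match PySem.List.index? (pvEffRanks ranks) model with   -- ranks.index(model); ValueError = none
  | some i => (i : Int)
  | none => pvFallbackA model (pvEffRanks ranks) 0

-- ===== PORT B =====
-- B's single pass: return idx on exact match; remember first partial-match idx in 'partial'
def pvLoopB (model : String) : List String → Int → Option Int → Int
  | [], _, p => p.getD 0
  | r :: rest, idx, p =>
    if r == model then idx
    else pvLoopB model rest (idx + 1)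
      (if p.isNone && (PySem.Str.isIn model r || PySem.Str.isIn r model) then some idx else p)

def get_model_rank_alt (model : String) (ranks : Option (List String)) : Int :=
  pvLoopB model (pvEffRanks ranks) 0 none

-- ===== PRECONDITION & SPEC =====
def Spec_get_model_rank (model : String) (ranks : Option (List String)) (out : Int) : Prop := out = get_model_rank_alt model ranks
instance (model : String) (ranks : Option (List String)) (out : Int) : Decidable (Spec_get_model_rank model ranks out) := by unfold Spec_get_model_rank; infer_instance

-- ===== CLAIM (what is proved, stated in full; the proofs are below) =====
def Claim_equal_get_model_rank : Prop := ∀ (model : String) (ranks : Option (List String)), Dom_get_model_rank model ranks → Spec_get_model_rank model ranks (get_model_rank model ranks)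

-- ===== LEMMAS AND PROOFS =====

-- Once a partial index is recorded, B returns the (shifted) exact-match index if any, else that partial index.
lemma pvLoopB_some (model : String) : ∀ (rest : List String) (idx j : Int),
    pvLoopB model rest idx (some j) =
      match PySem.List.index? rest model with
      | some i => idx + (i : Int)
      | none => j := by
  intro rest
  induction rest with
  | nil => intro idx j; simp [pvLoopB, PySem.List.index?]
  | cons r rest ih =>
    intro idx j
    by_cases h : r = model
    · subst h
      rw [PySem.List.index?_cons_self]
      simp [pvLoopB]
    · rw [PySem.List.index?_cons_of_ne rest h]
      simp only [pvLoopB, beq_iff_eq, if_neg h, Option.isNone_some, Bool.false_and,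
        if_neg (by simp : ¬ (false = true))]
      rw [ih (idx + 1) j]
      cases PySem.List.index? rest model with
      | none => simp
      | some i => simp; ring

-- With no partial recorded yet, B computes A's two-phase result (shifted by idx).
lemma pvLoopB_none (model : String) : ∀ (rest : List String) (idx : Int),
    pvLoopB model rest idx none =
      match PySem.List.index? rest model with
      | some i => idx + (i : Int)
      | none => pvFallbackA model rest idx := by
  intro rest
  induction rest with
  | nil => intro idx; simp [pvLoopB, pvFallbackA, PySem.List.index?]
  | cons r rest ih =>
    intro idx
    by_cases h : r = model
    · subst h
      rw [PySem.List.index?_cons_self]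
      simp [pvLoopB]
    · rw [PySem.List.index?_cons_of_ne rest h]
      by_cases hp : (PySem.Str.isIn model r || PySem.Str.isIn r model) = true
      · simp only [pvLoopB, beq_iff_eq, if_neg h, Option.isNone_none, Bool.true_and, hp, if_true]
        rw [pvLoopB_some model rest (idx + 1) idx]
        cases PySem.List.index? rest model with
        | none => simp only [Option.map_none]; simp only [pvFallbackA]; rw [if_pos hp]
        | some i => simp; ring
      · simp only [pvLoopB, beq_iff_eq, if_neg h, Option.isNone_none, Bool.true_and, hp,
          if_neg (by simp : ¬ (false = true))]
        rw [ih (idx + 1)]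
        cases PySem.List.index? rest model with
        | none => simp only [Option.map_none]; simp only [pvFallbackA]; rw [if_neg hp]
        | some i => simp; ring

-- ===== VERDICT (by name: the statement is the Claim_ definition above) =====
theorem get_model_rank_spec : Claim_equal_get_model_rank := by
  intro model ranks _
  unfold Spec_get_model_rank get_model_rank get_model_rank_alt
  rw [pvLoopB_none model (pvEffRanks ranks) 0]
  cases h : PySem.List.index? (pvEffRanks ranks) model with
  | none => rfl
  | some i => simp
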